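-- pv_equiv track=rewrite | github.com/m4rciosouza/ia_social_media | adiciona_legenda_imagem.py | dividir_sentencas
-- ===== SOURCE A (Python) =====
-- MAXIMO_LINHAS = 10
--
-- TAMANHO_MAXIMO_LINHA = 21
--
-- def dividir_sentencas(texto, tamanho_maximo_linha = TAMANHO_MAXIMO_LINHA, maximo_linhas = MAXIMO_LINHAS):
--     """Quebra o texto da imagem em pequenas sentenças a serem utilizadas por linhas para gerar a imagem.
--
--     Parametros
--     ----------
--     texto : str
--         texto completo a ser dividido por linhas
--     tamanho_maximo_linha : int (opcional)
--         tamanho máximo de caracteres por linha. Padrão de 21 caracteres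
--     maximo_linhas : int (opcional)
--         máximo de linhas por imagem. Padrão de 10 linhas
--     """
--     sentencas = []
--     sentenca_completa = ""
--     paragrafos = texto.split("\n")
--     num_linhas = 0
--
--     for paragrafo in paragrafos:
--         palavras = paragrafo.split(" ")
--         sentenca = ""
--         for palavra in palavras:
--             if (len(sentenca) + len(palavra)) > tamanho_maximo_linha:
--                 num_linhas += 1
--                 sentenca = palavra + " "
--                 sentenca_completa += palavra + " "
--                 if num_linhas == maximo_linhas:
--                     num_linhas = 0
--                     sentencas.append(sentenca_completa)
--                     sentenca_completa = ""
--             else: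
--                 sentenca += palavra + " "
--                 sentenca_completa += palavra + " "
--         if len(sentenca) > 0:
--             num_linhas += 1
--             if num_linhas == maximo_linhas:
--                 num_linhas = 0
--                 sentencas.append(sentenca_completa)
--                 sentenca_completa = ""
--
--     if len(sentenca_completa) > 0:
--         sentencas.append(sentenca_completa)
--
--     return sentencas
-- ===== SOURCE B (Python) =====
-- MAXIMO_LINHAS = 10
--
-- TAMANHO_MAXIMO_LINHA = 21
--
-- def dividir_sentencas(texto, tamanho_maximo_linha = TAMANHO_MAXIMO_LINHA, maximo_linhas = MAXIMO_LINHAS):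
--     """Two-phase rewrite: phase 1 wraps the text into per-line units, phase 2 paginates them."""
--     # Phase 1: one unit per produced line (a paragraph always contributes a final unit).
--     unidades = []
--     for paragrafo in texto.split("\n"):
--         sentenca = ""
--         bloco = ""
--         for palavra in paragrafo.split(" "):
--             if len(sentenca) + len(palavra) > tamanho_maximo_linha:
--                 unidades.append(bloco + palavra + " ")
--                 bloco = ""
--                 sentenca = palavra + " "
--             else:
--                 bloco += palavra + " "
--                 sentenca += palavra + " "
--         unidades.append(bloco)
--     # Phase 2: group every maximo_linhas units into one caption chunk.
--     sentencas = []
--     acumulado = ""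
--     contador = 0
--     for unidade in unidades:
--         acumulado += unidade
--         contador += 1
--         if contador == maximo_linhas:
--             sentencas.append(acumulado)
--             acumulado = ""
--             contador = 0
--     if len(acumulado) > 0:
--         sentencas.append(acumulado)
--     return sentencas
-- ===== Notes on version B (the rewrite author's own statement) =====
-- stated objective: alternative
-- what changed: Replaces A's single fused loop with mutable counters by a two-phase pipeline: phase 1 wraps the text into an intermediate list of per-line units, phase 2 separately paginates that list into caption chunks.
import Mathlib
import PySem

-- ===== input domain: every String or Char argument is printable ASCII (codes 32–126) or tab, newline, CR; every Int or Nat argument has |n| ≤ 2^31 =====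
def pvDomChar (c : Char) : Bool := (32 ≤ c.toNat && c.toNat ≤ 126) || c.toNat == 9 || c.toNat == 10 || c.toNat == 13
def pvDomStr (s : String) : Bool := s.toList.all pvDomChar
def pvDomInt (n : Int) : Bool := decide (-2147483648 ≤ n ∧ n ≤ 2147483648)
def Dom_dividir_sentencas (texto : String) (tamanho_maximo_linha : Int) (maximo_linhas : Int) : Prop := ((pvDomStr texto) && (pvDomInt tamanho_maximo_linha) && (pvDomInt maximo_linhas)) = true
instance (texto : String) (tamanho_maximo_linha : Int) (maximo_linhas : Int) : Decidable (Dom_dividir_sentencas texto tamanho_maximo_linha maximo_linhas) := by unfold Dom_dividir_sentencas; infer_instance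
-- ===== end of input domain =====

-- B replaces A's fused loop by a two-phase pipeline (wrap into per-line units, then paginate); alternative decomposition, same cost.


-- ===== PORT A =====
-- A's inner word loop; state = (sentencas, sentenca_completa, num_linhas, sentenca)
def pvAword (tam max : Int) (st : List (List Char) × List Char × Int × List Char) (w : List Char) :
    List (List Char) × List Char × Int × List Char :=
  if (st.2.2.2.length : Int) + (w.length : Int) > tam then
    -- num_linhas += 1; sentenca = palavra + " "; sentenca_completa += palavra + " "; maybe flush
    if st.2.2.1 + 1 = max then (st.1 ++ [st.2.1 ++ (w ++ [' '])], [], 0, w ++ [' '])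
    else (st.1, st.2.1 ++ (w ++ [' ']), st.2.2.1 + 1, w ++ [' '])
  else (st.1, st.2.1 ++ (w ++ [' ']), st.2.2.1, st.2.2.2 ++ (w ++ [' ']))

-- A's paragraph body; state = (sentencas, sentenca_completa, num_linhas)
def pvApar (tam max : Int) (st : List (List Char) × List Char × Int) (p : List Char) :
    List (List Char) × List Char × Int :=
  let r := (PySem.Chars.splitOn p [' ']).foldl (pvAword tam max) (st.1, st.2.1, st.2.2, ([] : List Char))
  if 0 < r.2.2.2.length then
    if r.2.2.1 + 1 = max then (r.1 ++ [r.2.1], [], 0)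
    else (r.1, r.2.1, r.2.2.1 + 1)
  else (r.1, r.2.1, r.2.2.1)

def dividir_sentencas (texto : String) (tamanho_maximo_linha : Int) (maximo_linhas : Int) : List String :=
  let r := (PySem.Chars.splitOn texto.toList ['\n']).foldl (pvApar tamanho_maximo_linha maximo_linhas) ([], [], 0)
  (if 0 < r.2.1.length then r.1 ++ [r.2.1] else r.1).map String.ofList

-- ===== PORT B =====
-- phase 1 inner word loop; state = (unidades, bloco, sentenca)
def pvBword (tam : Int) (st : List (List Char) × List Char × List Char) (w : List Char) :
    List (List Char) × List Char × List Char :=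
  if (st.2.2.length : Int) + (w.length : Int) > tam then
    (st.1 ++ [st.2.1 ++ (w ++ [' '])], ([] : List Char), w ++ [' '])
  else (st.1, st.2.1 ++ (w ++ [' ']), st.2.2 ++ (w ++ [' ']))

-- phase 1 paragraph body: run the word loop, flush the final block as one more unit
def pvBpar (tam : Int) (us : List (List Char)) (p : List Char) : List (List Char) :=
  let r := (PySem.Chars.splitOn p [' ']).foldl (pvBword tam) (us, ([] : List Char), ([] : List Char))
  r.1 ++ [r.2.1]

-- phase 2 step; state = (sentencas, acumulado, contador)
def pvPage (max : Int) (st : List (List Char) × List Char × Int) (u : List Char) :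
    List (List Char) × List Char × Int :=
  if st.2.2 + 1 = max then (st.1 ++ [st.2.1 ++ u], ([] : List Char), (0 : Int))
  else (st.1, st.2.1 ++ u, st.2.2 + 1)

def dividir_sentencas_alt (texto : String) (tamanho_maximo_linha : Int) (maximo_linhas : Int) : List String :=
  let us := (PySem.Chars.splitOn texto.toList ['\n']).foldl (pvBpar tamanho_maximo_linha) []
  let r := us.foldl (pvPage maximo_linhas) ([], [], 0)
  (if 0 < r.2.1.length then r.1 ++ [r.2.1] else r.1).map String.ofList

-- ===== PRECONDITION & SPEC =====
def Spec_dividir_sentencas (texto : String) (tamanho_maximo_linha : Int) (maximo_linhas : Int) (out : List String) : Prop := out = dividir_sentencas_alt texto tamanho_maximo_linha maximo_linhas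
instance (texto : String) (tamanho_maximo_linha : Int) (maximo_linhas : Int) (out : List String) : Decidable (Spec_dividir_sentencas texto tamanho_maximo_linha maximo_linhas out) := by unfold Spec_dividir_sentencas; infer_instance

-- ===== CLAIM (what is proved, stated in full; the proofs are below) =====
def Claim_equal_dividir_sentencas : Prop := ∀ (texto : String) (tamanho_maximo_linha : Int) (maximo_linhas : Int), Dom_dividir_sentencas texto tamanho_maximo_linha maximo_linhas → Spec_dividir_sentencas texto tamanho_maximo_linha maximo_linhas (dividir_sentencas texto tamanho_maximo_linha maximo_linhas)

-- ===== LEMMAS AND PROOFS =====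

-- phase 2 of B, run from the initial state
def pvP2 (max : Int) (us : List (List Char)) : List (List Char) × List Char × Int :=
  us.foldl (pvPage max) ([], [], 0)

lemma pvP2_append (max : Int) (us : List (List Char)) (u : List Char) :
    pvP2 max (us ++ [u]) = pvPage max (pvP2 max us) u := by
  simp [pvP2, List.foldl_append]

-- one word of A, started from the phase-2 image of B's phase-1 state, is the image of one word of B
lemma pv_step (tam max : Int) (us : List (List Char)) (blk sent w : List Char) :
    pvAword tam max ((pvP2 max us).1, (pvP2 max us).2.1 ++ blk, (pvP2 max us).2.2, sent) w
    = ((pvP2 max (pvBword tam (us, blk, sent) w).1).1,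
       (pvP2 max (pvBword tam (us, blk, sent) w).1).2.1 ++ (pvBword tam (us, blk, sent) w).2.1,
       (pvP2 max (pvBword tam (us, blk, sent) w).1).2.2,
       (pvBword tam (us, blk, sent) w).2.2) := by
  by_cases hov : (sent.length : Int) + (w.length : Int) > tam
  · by_cases hfl : (pvP2 max us).2.2 + 1 = max
    · simp [pvAword, pvBword, hov, hfl, pvP2_append, pvPage, List.append_assoc]
    · simp [pvAword, pvBword, hov, hfl, pvP2_append, pvPage, List.append_assoc]
  · simp [pvAword, pvBword, hov, List.append_assoc]

-- A's word loop is the phase-2 image of B's word loop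
lemma pv_words (tam max : Int) :
    ∀ (ws : List (List Char)) (us : List (List Char)) (blk sent : List Char),
    ws.foldl (pvAword tam max) ((pvP2 max us).1, (pvP2 max us).2.1 ++ blk, (pvP2 max us).2.2, sent)
    = ((pvP2 max (ws.foldl (pvBword tam) (us, blk, sent)).1).1,
       (pvP2 max (ws.foldl (pvBword tam) (us, blk, sent)).1).2.1 ++ (ws.foldl (pvBword tam) (us, blk, sent)).2.1,
       (pvP2 max (ws.foldl (pvBword tam) (us, blk, sent)).1).2.2,
       (ws.foldl (pvBword tam) (us, blk, sent)).2.2)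
  | [], us, blk, sent => rfl
  | w :: ws, us, blk, sent => by
    rw [List.foldl_cons, List.foldl_cons, pv_step]
    rcases h : pvBword tam (us, blk, sent) w with ⟨us', blk', sent'⟩
    exact pv_words tam max ws us' blk' sent'

-- after at least one word, the current line string is nonempty (it ends with a space)
lemma pv_sent_ne (tam : Int) :
    ∀ (ws : List (List Char)) (st : List (List Char) × List Char × List Char),
    ws ≠ [] → (ws.foldl (pvBword tam) st).2.2 ≠ []
  | [], _, h => absurd rfl h
  | [w], st, _ => by
    simp only [List.foldl_cons, List.foldl_nil, pvBword]
    split_ifs <;> simp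
  | w :: w2 :: ws, st, _ => by
    rw [List.foldl_cons]
    exact pv_sent_ne tam (w2 :: ws) _ (by simp)

-- splitOn never returns the empty list
lemma pv_go_ne (sep : List Char) :
    ∀ (fuel : Nat) (l cur : List Char) (acc : List (List Char)),
    PySem.Chars.splitOn.go sep fuel l cur acc ≠ [] := by
  intro fuel
  induction fuel with
  | zero => intro l cur acc; simp [PySem.Chars.splitOn.go]
  | succ n ih =>
    intro l cur acc
    cases l with
    | nil => simp [PySem.Chars.splitOn.go]
    | cons c rest =>
      rw [PySem.Chars.splitOn.go]
      split_ifs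
      · exact ih _ _ _
      · exact ih _ _ _

lemma pv_splitOn_ne (s sep : List Char) : PySem.Chars.splitOn s sep ≠ [] := by
  unfold PySem.Chars.splitOn
  exact pv_go_ne sep _ s [] []

-- one paragraph of A is the phase-2 image of one paragraph of B
lemma pv_par_step (tam max : Int) (us : List (List Char)) (p : List Char) :
    pvApar tam max ((pvP2 max us).1, (pvP2 max us).2.1, (pvP2 max us).2.2) p
    = ((pvP2 max (pvBpar tam us p)).1, (pvP2 max (pvBpar tam us p)).2.1, (pvP2 max (pvBpar tam us p)).2.2) := by
  have hw := pv_words tam max (PySem.Chars.splitOn p [' ']) us [] []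
  rcases hB : (PySem.Chars.splitOn p [' ']).foldl (pvBword tam) (us, [], []) with ⟨us', blk', sent'⟩
  rw [hB] at hw
  have hne : sent' ≠ [] := by
    have := pv_sent_ne tam (PySem.Chars.splitOn p [' ']) (us, [], []) (pv_splitOn_ne p [' '])
    rw [hB] at this; exact this
  simp only [pvApar, pvBpar, hB, List.append_nil] at *
  rw [hw]
  have hlen : 0 < sent'.length := List.length_pos_of_ne_nil hne
  simp only [hlen, if_pos, pvP2_append, pvPage]

-- A's paragraph loop is the phase-2 image of B's phase-1 loop
lemma pv_pars (tam max : Int) :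
    ∀ (ps : List (List Char)) (us : List (List Char)),
    ps.foldl (pvApar tam max) ((pvP2 max us).1, (pvP2 max us).2.1, (pvP2 max us).2.2)
    = ((pvP2 max (ps.foldl (pvBpar tam) us)).1, (pvP2 max (ps.foldl (pvBpar tam) us)).2.1,
       (pvP2 max (ps.foldl (pvBpar tam) us)).2.2)
  | [], us => rfl
  | p :: ps, us => by
    rw [List.foldl_cons, List.foldl_cons, pv_par_step]
    exact pv_pars tam max ps (pvBpar tam us p)

-- ===== VERDICT (by name: the statement is the Claim_ definition above) =====
theorem dividir_sentencas_spec : Claim_equal_dividir_sentencas := by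
  intro texto tam max _
  unfold Spec_dividir_sentencas dividir_sentencas dividir_sentencas_alt
  have h := pv_pars tam max (PySem.Chars.splitOn texto.toList ['\n']) []
  have h0 : pvP2 max [] = (([] : List (List Char)), ([] : List Char), (0 : Int)) := rfl
  rw [h0] at h
  simp only [pvP2] at h
  rw [h]
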